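-- pv_equiv track=rewrite | github.com/Potato0705/DimASQP | tools/category_analysis.py | _discover_axes
-- ===== SOURCE A (Python) =====
-- from typing import Dict, List, Set, Tuple
--
-- def _split_category(cat: str) -> Tuple[str, str]:
--     parts = cat.split("#", 1)
--     if len(parts) == 2:
--         return parts[0], parts[1]
--     return cat, ""
--
-- def _discover_axes(all_cats: Set[str]) -> Tuple[List[str], List[str]]:
--     entities: Set[str] = set()
--     attributes: Set[str] = set()
--     for cat in all_cats:
--         e, a = _split_category(cat)
--         entities.add(e)
--         attributes.add(a)
--     entity_order = ["FOOD", "SERVICE", "RESTAURANT", "AMBIENCE", "DRINKS", "LOCATION"]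
--     attr_order = ["GENERAL", "PRICES", "QUALITY", "STYLE_OPTIONS", "MISCELLANEOUS"]
--     entities_sorted = [e for e in entity_order if e in entities]
--     entities_sorted += sorted(entities - set(entity_order))
--     attrs_sorted = [a for a in attr_order if a in attributes]
--     attrs_sorted += sorted(attributes - set(attr_order))
--     return entities_sorted, attrs_sorted
-- ===== SOURCE B (Python) =====
-- from typing import List, Set, Tuple
--
-- _ENTITY_ORDER = ["FOOD", "SERVICE", "RESTAURANT", "AMBIENCE", "DRINKS", "LOCATION"]
-- _ATTR_ORDER = ["GENERAL", "PRICES", "QUALITY", "STYLE_OPTIONS", "MISCELLANEOUS"]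
--
-- def _ordered(values: Set[str], priority: List[str]) -> List[str]:
--     rank = {name: i for i, name in enumerate(priority)}
--     n = len(priority)
--     return sorted(values, key=lambda v: (rank[v], "") if v in rank else (n, v))
--
-- def _discover_axes(all_cats: Set[str]) -> Tuple[List[str], List[str]]:
--     entities: Set[str] = set()
--     attributes: Set[str] = set()
--     for cat in all_cats:
--         e, _sep, a = cat.partition("#")
--         entities.add(e)
--         attributes.add(a)
--     return _ordered(entities, _ENTITY_ORDER), _ordered(attributes, _ATTR_ORDER)
-- ===== Notes on version B (the rewrite author's own statement) =====
-- stated objective: alternative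
-- what changed: B splits each category with str.partition instead of split('#',1) and replaces A's partition-and-concatenate ordering (filter the priority list, then append the sorted set difference) by one stable sort per axis keyed by a rank-dict composite key (known items rank in priority order, unknown items after them alphabetically).
import Mathlib
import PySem

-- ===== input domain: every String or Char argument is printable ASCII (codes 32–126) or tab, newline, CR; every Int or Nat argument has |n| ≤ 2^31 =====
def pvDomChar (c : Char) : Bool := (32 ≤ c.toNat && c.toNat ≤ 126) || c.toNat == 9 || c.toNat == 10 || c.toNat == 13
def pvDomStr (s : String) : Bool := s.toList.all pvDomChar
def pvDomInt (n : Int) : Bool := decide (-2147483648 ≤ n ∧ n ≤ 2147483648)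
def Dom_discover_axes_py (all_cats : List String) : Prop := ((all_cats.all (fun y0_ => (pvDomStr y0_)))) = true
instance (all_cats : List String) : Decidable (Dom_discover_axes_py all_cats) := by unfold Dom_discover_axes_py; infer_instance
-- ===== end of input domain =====

-- B replaces A's partition-then-concatenate ordering (filter the priority list, then append the sorted set difference)
-- by ONE stable sort per axis with a rank-dict composite key; objective: alternative decomposition, same cost.
-- The argument is a Python set, so both sides depend only on the distinct elements of `all_cats`.

-- ===== PORT A =====
def split_category_py (cat : String) : String × String :=
  -- "#" is a nonempty separator, so cat.split("#", 1) never raises; getD only discharges the impossible none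
  let parts := (PySem.Str.splitMax? cat "#" 1).getD []
  if parts.length = 2 then (parts.getD 0 "", parts.getD 1 "") else (cat, "")

def discover_axes_py (all_cats : List String) : List String × List String :=
  let sets := all_cats.foldl
    (fun (p : PySem.Set String × PySem.Set String) cat =>
      let ea := split_category_py cat
      (p.1.add ea.1, p.2.add ea.2))
    (PySem.Set.ofList [], PySem.Set.ofList [])
  let entities := sets.1
  let attributes := sets.2
  let entity_order : List String := ["FOOD", "SERVICE", "RESTAURANT", "AMBIENCE", "DRINKS", "LOCATION"]
  let attr_order : List String := ["GENERAL", "PRICES", "QUALITY", "STYLE_OPTIONS", "MISCELLANEOUS"]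
  let entities_sorted :=
    (entity_order.filter (fun e => entities.contains e)) ++
      PySem.List.sorted (PySem.Set.diff entities (PySem.Set.ofList entity_order)) (fun x => x)
  let attrs_sorted :=
    (attr_order.filter (fun a => attributes.contains a)) ++
      PySem.List.sorted (PySem.Set.diff attributes (PySem.Set.ofList attr_order)) (fun x => x)
  (entities_sorted, attrs_sorted)

-- ===== PORT B =====
-- hand port of cat.partition("#") (PySem has no partition): scan to the first '#'; exact for this 1-char separator
def part_chars (cs : List Char) : List Char × List Char :=
  match cs with
  | [] => ([], [])
  | c :: rest => if c = '#' then ([], rest)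
                 else let p := part_chars rest; (c :: p.1, p.2)

def partition_hash (cat : String) : String × String :=
  let p := part_chars cat.toList
  (String.ofList p.1, String.ofList p.2)

def ordered_alt (values : PySem.Set String) (priority : List String) : List String :=
  let rank : PySem.Dict String Int :=
    (PySem.List.enumerate priority).foldl (fun d pr => d.insert pr.2 pr.1) (PySem.Dict.mk [])
  let n : Int := priority.length
  PySem.List.sorted values (fun v =>
    match rank.get? v with
    | some i => toLex ((i, "") : Int × String)
    | none => toLex ((n, v) : Int × String))

def discover_axes_py_alt (all_cats : List String) : List String × List String :=
  let sets := all_cats.foldl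
    (fun (p : PySem.Set String × PySem.Set String) cat =>
      let ea := partition_hash cat
      (p.1.add ea.1, p.2.add ea.2))
    (PySem.Set.ofList [], PySem.Set.ofList [])
  (ordered_alt sets.1 ["FOOD", "SERVICE", "RESTAURANT", "AMBIENCE", "DRINKS", "LOCATION"],
   ordered_alt sets.2 ["GENERAL", "PRICES", "QUALITY", "STYLE_OPTIONS", "MISCELLANEOUS"])

-- ===== PRECONDITION & SPEC =====
def Spec_discover_axes_py (all_cats : List String) (out : List String × List String) : Prop := out = discover_axes_py_alt all_cats
instance (all_cats : List String) (out : List String × List String) : Decidable (Spec_discover_axes_py all_cats out) := by unfold Spec_discover_axes_py; infer_instance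

-- ===== CLAIM (what is proved, stated in full; the proofs are below) =====
def Claim_equal_discover_axes_py : Prop := ∀ (all_cats : List String), Dom_discover_axes_py all_cats → Spec_discover_axes_py all_cats (discover_axes_py all_cats)

-- ===== LEMMAS AND PROOFS =====

lemma go_m0 (sep : List Char) (f : Nat) (l cur : List Char) (acc : List (List Char)) :
    PySem.Chars.splitOnMax.go sep f 0 l cur acc = ((cur.reverse ++ l) :: acc).reverse := by
  cases f with
  | zero => simp [PySem.Chars.splitOnMax.go]
  | succ f => cases l with
    | nil => simp [PySem.Chars.splitOnMax.go]
    | cons c rest => simp [PySem.Chars.splitOnMax.go]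

lemma go_one : ∀ (cs : List Char) (f : Nat) (cur : List Char), cs.length < f →
    PySem.Chars.splitOnMax.go ['#'] f 1 cs cur [] =
      if '#' ∈ cs then [cur.reverse ++ (part_chars cs).1, (part_chars cs).2]
      else [cur.reverse ++ cs] := by
  intro cs
  induction cs with
  | nil => intro f cur h; cases f with
    | zero => omega
    | succ f => simp [PySem.Chars.splitOnMax.go]
  | cons c rest ih =>
    intro f cur h
    cases f with
    | zero => omega
    | succ f =>
      by_cases hc : c = '#'
      · subst hc
        have : PySem.Chars.splitOnMax.go ['#'] (f+1) 1 ('#' :: rest) cur [] =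
            PySem.Chars.splitOnMax.go ['#'] f 0 rest [] [cur.reverse] := by
          simp [PySem.Chars.splitOnMax.go, List.isPrefixOf]
        rw [this, go_m0]
        simp [part_chars]
      · have hp : ¬ ('#' = c) := fun h' => hc h'.symm
        have : PySem.Chars.splitOnMax.go ['#'] (f+1) 1 (c :: rest) cur [] =
            PySem.Chars.splitOnMax.go ['#'] f 1 rest (c :: cur) [] := by
          simp [PySem.Chars.splitOnMax.go, List.isPrefixOf, hp]
        rw [this, ih f (c :: cur) (by simpa using Nat.lt_of_succ_lt_succ h)]
        by_cases hm : '#' ∈ rest <;> simp [hm, hc, hp, part_chars]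

lemma part_chars_not_mem (cs : List Char) (h : '#' ∉ cs) : part_chars cs = (cs, []) := by
  induction cs with
  | nil => rfl
  | cons c rest ih =>
    simp only [List.mem_cons, not_or] at h
    simp [part_chars, Ne.symm h.1, ih h.2]

-- the two splitting helpers agree on every string
lemma split_eq_partition (cat : String) : split_category_py cat = partition_hash cat := by
  have hs : PySem.Chars.splitMax? cat.toList "#".toList 1 =
      some (PySem.Chars.splitOnMax.go ['#'] (cat.toList.length + 1) 1 cat.toList [] []) := by
    simp [PySem.Chars.splitMax?, PySem.Chars.splitOnMax]
  rw [go_one cat.toList (cat.toList.length + 1) [] (by omega)] at hs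
  unfold split_category_py partition_hash
  simp only [PySem.Str.splitMax?, hs]
  by_cases hm : '#' ∈ cat.toList
  · simp [hm]
  · rw [part_chars_not_mem cat.toList hm]
    simp [hm, String.ofList_toList]

-- both components of the accumulated pair of sets stay duplicate-free along the loop
lemma fold_nodup (f : String → String × String) :
    ∀ (l : List String) (p : PySem.Set String × PySem.Set String),
      p.1.Nodup → p.2.Nodup →
      ((l.foldl (fun p cat => (p.1.add (f cat).1, p.2.add (f cat).2)) p).1.Nodup ∧
       (l.foldl (fun p cat => (p.1.add (f cat).1, p.2.add (f cat).2)) p).2.Nodup) := by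
  intro l
  induction l with
  | nil => intro p h1 h2; exact ⟨h1, h2⟩
  | cons c rest ih =>
    intro p h1 h2
    exact ih _ (PySem.Set.nodup_add _ _ h1) (PySem.Set.nodup_add _ _ h2)

-- the generic ordering fact: one keyed sort = priority filter ++ sorted set difference
lemma order_eq (s : List String) (hs : s.Nodup) (priority : List String) (hp : priority.Nodup)
    (key : String → Lex (Int × String))
    (hin : List.Pairwise (fun a b => key a < key b) priority)
    (hout : ∀ v, v ∉ priority → key v = toLex ((priority.length : Int), v))
    (hcross : ∀ a ∈ priority, ∀ v, v ∉ priority → key a < key v) :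
    PySem.List.sorted s key =
      (priority.filter (fun e => s.contains e)) ++
        PySem.List.sorted (PySem.Set.diff s (PySem.Set.ofList priority)) (fun x => x) := by
  set P := priority.filter (fun e => s.contains e) with hP
  set Q := PySem.List.sorted (PySem.Set.diff s (PySem.Set.ofList priority)) (fun x => x) with hQ
  have hdiff : PySem.Set.diff s (PySem.Set.ofList priority) = s.filter (fun v => decide (v ∉ priority)) := by
    show List.filter _ s = _
    apply List.filter_congr
    intro x _
    simp [PySem.Set.mem_ofList]
  have hQperm : Q.Perm (s.filter (fun v => decide (v ∉ priority))) := by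
    rw [hQ, hdiff]; exact PySem.List.sorted_perm _ _ _
  have hQmem : ∀ a, a ∈ Q ↔ (a ∈ s ∧ a ∉ priority) := by
    intro a; rw [hQperm.mem_iff]; simp
  have hPmem : ∀ a, a ∈ P ↔ (a ∈ priority ∧ a ∈ s) := by
    intro a; simp [hP]
  have hQnodup : Q.Nodup := hQperm.nodup_iff.mpr (hs.filter _)
  have hPnodup : P.Nodup := hp.filter _
  apply PySem.List.sorted_eq_of_perm_of_pairwise_lt
  · rw [List.perm_ext_iff_of_nodup _ hs]
    · intro a
      simp only [List.mem_append, hPmem, hQmem]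
      by_cases hpa : a ∈ priority <;> simp [hpa]
    · apply List.Nodup.append hPnodup hQnodup
      intro a haP haQ
      exact ((hQmem a).mp haQ).2 ((hPmem a).mp haP).1
  · rw [List.pairwise_append]
    refine ⟨hin.filter _, ?_, ?_⟩
    · have hle : List.Pairwise (fun a b : String => a ≤ b) Q := by
        simpa using PySem.List.sorted_pairwise (PySem.Set.diff s (PySem.Set.ofList priority)) (fun x => x)
      have hne : List.Pairwise (fun a b : String => a ≠ b) Q := hQnodup
      refine (hle.and hne).imp_of_mem ?_
      intro a b ha hb hab
      rw [hout a ((hQmem a).mp ha).2, hout b ((hQmem b).mp hb).2]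
      rw [Prod.Lex.toLex_lt_toLex]
      exact Or.inr ⟨rfl, lt_of_le_of_ne hab.1 hab.2⟩
    · intro a haP b hbQ
      exact hcross a ((hPmem a).mp haP).1 b ((hQmem b).mp hbQ).2


-- one keyed sort equals A's partition-and-concatenate, for each concrete axis
lemma ordered_alt_entity (s : PySem.Set String) (hs : List.Nodup s) :
    ordered_alt s ["FOOD", "SERVICE", "RESTAURANT", "AMBIENCE", "DRINKS", "LOCATION"] =
      (["FOOD", "SERVICE", "RESTAURANT", "AMBIENCE", "DRINKS", "LOCATION"].filter (fun e => s.contains e)) ++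
        PySem.List.sorted (PySem.Set.diff s (PySem.Set.ofList ["FOOD", "SERVICE", "RESTAURANT", "AMBIENCE", "DRINKS", "LOCATION"])) (fun x => x) := by
  unfold ordered_alt
  have hrank : (PySem.List.enumerate ["FOOD", "SERVICE", "RESTAURANT", "AMBIENCE", "DRINKS", "LOCATION"]).foldl
      (fun d pr => d.insert pr.2 pr.1) (PySem.Dict.mk []) =
      PySem.Dict.mk [("FOOD",(0:Int)),("SERVICE",1),("RESTAURANT",2),("AMBIENCE",3),("DRINKS",4),("LOCATION",5)] := by
    decide
  rw [hrank]
  apply order_eq s hs _ (by decide)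
  · decide
  · intro v hv
    simp only [List.mem_cons, List.not_mem_nil, or_false, not_or] at hv
    obtain ⟨h1, h2, h3, h4, h5, h6⟩ := hv
    have e1 : ("FOOD" == v) = false := beq_eq_false_iff_ne.mpr (Ne.symm h1)
    have e2 : ("SERVICE" == v) = false := beq_eq_false_iff_ne.mpr (Ne.symm h2)
    have e3 : ("RESTAURANT" == v) = false := beq_eq_false_iff_ne.mpr (Ne.symm h3)
    have e4 : ("AMBIENCE" == v) = false := beq_eq_false_iff_ne.mpr (Ne.symm h4)
    have e5 : ("DRINKS" == v) = false := beq_eq_false_iff_ne.mpr (Ne.symm h5)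
    have e6 : ("LOCATION" == v) = false := beq_eq_false_iff_ne.mpr (Ne.symm h6)
    simp [PySem.Dict.get?, List.find?, e1, e2, e3, e4, e5, e6]
  · intro a ha v hv
    simp only [List.mem_cons, List.not_mem_nil, or_false, not_or] at hv
    obtain ⟨h1, h2, h3, h4, h5, h6⟩ := hv
    have e1 : ("FOOD" == v) = false := beq_eq_false_iff_ne.mpr (Ne.symm h1)
    have e2 : ("SERVICE" == v) = false := beq_eq_false_iff_ne.mpr (Ne.symm h2)
    have e3 : ("RESTAURANT" == v) = false := beq_eq_false_iff_ne.mpr (Ne.symm h3)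
    have e4 : ("AMBIENCE" == v) = false := beq_eq_false_iff_ne.mpr (Ne.symm h4)
    have e5 : ("DRINKS" == v) = false := beq_eq_false_iff_ne.mpr (Ne.symm h5)
    have e6 : ("LOCATION" == v) = false := beq_eq_false_iff_ne.mpr (Ne.symm h6)
    fin_cases ha <;>
    · simp only [PySem.Dict.get?, List.find?, e1, e2, e3, e4, e5, e6]
      simp [Prod.Lex.toLex_lt_toLex]

lemma ordered_alt_attr (s : PySem.Set String) (hs : List.Nodup s) :
    ordered_alt s ["GENERAL", "PRICES", "QUALITY", "STYLE_OPTIONS", "MISCELLANEOUS"] =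
      (["GENERAL", "PRICES", "QUALITY", "STYLE_OPTIONS", "MISCELLANEOUS"].filter (fun e => s.contains e)) ++
        PySem.List.sorted (PySem.Set.diff s (PySem.Set.ofList ["GENERAL", "PRICES", "QUALITY", "STYLE_OPTIONS", "MISCELLANEOUS"])) (fun x => x) := by
  unfold ordered_alt
  have hrank : (PySem.List.enumerate ["GENERAL", "PRICES", "QUALITY", "STYLE_OPTIONS", "MISCELLANEOUS"]).foldl
      (fun d pr => d.insert pr.2 pr.1) (PySem.Dict.mk []) =
      PySem.Dict.mk [("GENERAL",(0:Int)),("PRICES",1),("QUALITY",2),("STYLE_OPTIONS",3),("MISCELLANEOUS",4)] := by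
    decide
  rw [hrank]
  apply order_eq s hs _ (by decide)
  · decide
  · intro v hv
    simp only [List.mem_cons, List.not_mem_nil, or_false, not_or] at hv
    obtain ⟨h1, h2, h3, h4, h5⟩ := hv
    have e1 : ("GENERAL" == v) = false := beq_eq_false_iff_ne.mpr (Ne.symm h1)
    have e2 : ("PRICES" == v) = false := beq_eq_false_iff_ne.mpr (Ne.symm h2)
    have e3 : ("QUALITY" == v) = false := beq_eq_false_iff_ne.mpr (Ne.symm h3)
    have e4 : ("STYLE_OPTIONS" == v) = false := beq_eq_false_iff_ne.mpr (Ne.symm h4)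
    have e5 : ("MISCELLANEOUS" == v) = false := beq_eq_false_iff_ne.mpr (Ne.symm h5)
    simp [PySem.Dict.get?, List.find?, e1, e2, e3, e4, e5]
  · intro a ha v hv
    simp only [List.mem_cons, List.not_mem_nil, or_false, not_or] at hv
    obtain ⟨h1, h2, h3, h4, h5⟩ := hv
    have e1 : ("GENERAL" == v) = false := beq_eq_false_iff_ne.mpr (Ne.symm h1)
    have e2 : ("PRICES" == v) = false := beq_eq_false_iff_ne.mpr (Ne.symm h2)
    have e3 : ("QUALITY" == v) = false := beq_eq_false_iff_ne.mpr (Ne.symm h3)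
    have e4 : ("STYLE_OPTIONS" == v) = false := beq_eq_false_iff_ne.mpr (Ne.symm h4)
    have e5 : ("MISCELLANEOUS" == v) = false := beq_eq_false_iff_ne.mpr (Ne.symm h5)
    fin_cases ha <;>
    · simp only [PySem.Dict.get?, List.find?, e1, e2, e3, e4, e5]
      simp [Prod.Lex.toLex_lt_toLex]

-- ===== VERDICT (by name: the statement is the Claim_ definition above) =====
theorem discover_axes_py_spec : Claim_equal_discover_axes_py := by
  intro all_cats _
  unfold Spec_discover_axes_py discover_axes_py discover_axes_py_alt
  simp only [split_eq_partition]
  set sets := all_cats.foldl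
    (fun (p : PySem.Set String × PySem.Set String) cat =>
      (p.1.add (partition_hash cat).1, p.2.add (partition_hash cat).2))
    (PySem.Set.ofList [], PySem.Set.ofList []) with hsets
  have h := fold_nodup (fun cat => partition_hash cat) all_cats (PySem.Set.ofList [], PySem.Set.ofList []) (by decide) (by decide)
  rw [← hsets] at h
  rw [ordered_alt_entity sets.1 h.1, ordered_alt_attr sets.2 h.2]
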